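-- pv_equiv track=rewrite | github.com/thehalleyyoung/deppy | src/deppy/incremental/differ.py | _resolve_local_import
-- ===== SOURCE A (Python) =====
-- from typing import Dict, Iterable, List, Mapping, Optional, Sequence, Set, Tuple
--
-- def _resolve_local_import(
--
--     import_name: str,
--     module_name_index: Mapping[str, str],
-- ) -> Optional[str]:
--     cleaned = import_name.strip(".")
--     if not cleaned:
--         return None
--     candidate = cleaned
--     while candidate:
--         if candidate in module_name_index:
--             return module_name_index[candidate]
--         if "." not in candidate:
--             break
--         candidate = candidate.rsplit(".", 1)[0]
--     return None
-- ===== SOURCE B (Python) =====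
-- def _resolve_local_import(import_name, module_name_index):
--     cleaned = import_name.strip(".")
--     if not cleaned:
--         return None
--     best = None
--     prefix = ""
--     for ch in cleaned:
--         if ch == "." and prefix in module_name_index:
--             best = module_name_index[prefix]
--         prefix += ch
--     if prefix in module_name_index:
--         best = module_name_index[prefix]
--     return best
-- ===== Notes on version B (the rewrite author's own statement) =====
-- stated objective: alternative
-- what changed: B replaces A's longest-to-shortest rsplit-truncation loop with a single forward character scan that builds the prefix incrementally and keeps the last (hence longest) matching prefix.
import Mathlib
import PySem

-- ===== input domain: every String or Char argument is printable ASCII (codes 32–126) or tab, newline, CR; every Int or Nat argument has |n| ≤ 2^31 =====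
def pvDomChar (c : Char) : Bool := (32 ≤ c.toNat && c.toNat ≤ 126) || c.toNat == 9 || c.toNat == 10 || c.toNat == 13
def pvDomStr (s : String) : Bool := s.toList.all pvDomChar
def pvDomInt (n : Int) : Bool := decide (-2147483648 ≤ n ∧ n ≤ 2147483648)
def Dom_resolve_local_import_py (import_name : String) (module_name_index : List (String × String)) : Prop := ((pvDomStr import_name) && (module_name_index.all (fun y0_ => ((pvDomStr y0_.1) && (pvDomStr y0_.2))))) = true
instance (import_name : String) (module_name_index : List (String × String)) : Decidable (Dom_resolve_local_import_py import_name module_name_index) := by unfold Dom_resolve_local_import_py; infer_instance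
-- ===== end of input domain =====

-- B replaces A's longest-to-shortest rsplit-truncation loop with a single forward
-- character scan keeping the last (= longest) matching prefix; same return value.

-- dict membership + lookup on the association list (first match), shared primitive
def pvLook (idx : List (String × String)) (k : List Char) : Option String :=
  match idx with
  | [] => none
  | (a, b) :: t => if a.toList = k then some b else pvLook t k

-- ===== PORT A =====
-- candidate.rsplit(".", 1)[0]: everything before the LAST '.' (exact by hand; no rsplit in PySem)
def pvRsplitHead (cs : List Char) : List Char :=
  ((cs.reverse.dropWhile (fun c => c ≠ '.')).drop 1).reverse

theorem pvDropWhileDot (l : List Char) (h : '.' ∈ l) :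
    l.dropWhile (fun c => c ≠ '.') = '.' :: (l.dropWhile (fun c => c ≠ '.')).tail := by
  induction l with
  | nil => simp at h
  | cons a t ih =>
    by_cases ha : a = '.'
    · subst ha; rw [List.dropWhile_cons_of_neg (by simp)]; rfl
    · rw [List.dropWhile_cons_of_pos (by simpa using ha)]
      refine ih ?_
      cases h with
      | head => exact absurd rfl ha
      | tail _ h => exact h

theorem pvRsplitHead_decomp (cs : List Char) (h : '.' ∈ cs) :
    ∃ t, cs = pvRsplitHead cs ++ '.' :: t ∧ '.' ∉ t := by
  have hmem : '.' ∈ cs.reverse := by simpa using h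
  have hdw := pvDropWhileDot cs.reverse hmem
  refine ⟨(cs.reverse.takeWhile (fun c => c ≠ '.')).reverse, ?_, ?_⟩
  · have hsplit : cs.reverse = cs.reverse.takeWhile (fun c => c ≠ '.') ++
        '.' :: (cs.reverse.dropWhile (fun c => c ≠ '.')).tail := by
      conv_lhs => rw [← List.takeWhile_append_dropWhile (p := fun c => decide (c ≠ '.'))
        (l := cs.reverse)]
      conv_lhs => rw [hdw]
    have hcs : cs = ((cs.reverse.dropWhile (fun c => c ≠ '.')).tail).reverse ++
        '.' :: (cs.reverse.takeWhile (fun c => c ≠ '.')).reverse := by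
      conv_lhs => rw [← List.reverse_reverse cs, hsplit]
      simp
    have hr : pvRsplitHead cs = ((cs.reverse.dropWhile (fun c => c ≠ '.')).tail).reverse := by
      unfold pvRsplitHead
      rw [hdw]
      rfl
    rw [hr]
    exact hcs
  · intro hmt
    have : '.' ∈ cs.reverse.takeWhile (fun c => c ≠ '.') := by simpa using hmt
    have := List.mem_takeWhile_imp this
    simp at this

theorem pvRsplitHead_len (cs : List Char) (h : '.' ∈ cs) :
    (pvRsplitHead cs).length < cs.length := by
  obtain ⟨t, hcs, -⟩ := pvRsplitHead_decomp cs h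
  conv_rhs => rw [hcs]
  simp

-- the while-loop of A: check membership, break if no '.', else truncate at last '.'
def pvAloop (idx : List (String × String)) (cand : List Char) : Option String :=
  if _hnil : cand = [] then none
  else
    match pvLook idx cand with
    | some v => some v
    | none =>
      if hdot : '.' ∈ cand then pvAloop idx (pvRsplitHead cand) else none
termination_by cand.length
decreasing_by exact pvRsplitHead_len cand hdot

def resolve_local_import_py (import_name : String) (module_name_index : List (String × String)) : Option String :=
  let cleaned := PySem.Chars.stripChars import_name.toList ['.']
  if cleaned = [] then none
  else pvAloop module_name_index cleaned

-- ===== PORT B =====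
def resolve_local_import_py_alt (import_name : String) (module_name_index : List (String × String)) : Option String :=
  let cleaned := PySem.Chars.stripChars import_name.toList ['.']
  if cleaned = [] then none
  else
    let st := cleaned.foldl
      (fun (st : List Char × Option String) ch =>
        (st.1 ++ [ch],
         if ch = '.' then
           match pvLook module_name_index st.1 with
           | some v => some v
           | none => st.2
         else st.2))
      ([], none)
    match pvLook module_name_index st.1 with
    | some v => some v
    | none => st.2

-- ===== PRECONDITION & SPEC =====
def Spec_resolve_local_import_py (import_name : String) (module_name_index : List (String × String)) (out : Option String) : Prop := out = resolve_local_import_py_alt import_name module_name_index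
instance (import_name : String) (module_name_index : List (String × String)) (out : Option String) : Decidable (Spec_resolve_local_import_py import_name module_name_index out) := by unfold Spec_resolve_local_import_py; infer_instance

-- ===== CLAIM (what is proved, stated in full; the proofs are below) =====
def Claim_equal_resolve_local_import_py : Prop := ∀ (import_name : String) (module_name_index : List (String × String)), Dom_resolve_local_import_py import_name module_name_index → Spec_resolve_local_import_py import_name module_name_index (resolve_local_import_py import_name module_name_index)

-- ===== LEMMAS AND PROOFS =====

-- the prefixes of cs that end just before a '.', shortest first
def pvDprefs : List Char → List (List Char)
  | [] => []
  | c :: rest => (if c = '.' then [[]] else []) ++ (pvDprefs rest).map (c :: ·)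

def pvFirstSome : List (Option String) → Option String
  | [] => none
  | some v :: _ => some v
  | none :: r => pvFirstSome r

def pvLastUpd (idx : List (String × String)) (b : Option String) (l : List (List Char)) : Option String :=
  l.foldl (fun b p => match pvLook idx p with | some v => some v | none => b) b

theorem pvDprefs_no_dot (cs : List Char) (h : '.' ∉ cs) : pvDprefs cs = [] := by
  induction cs with
  | nil => rfl
  | cons c rest ih =>
    simp only [List.mem_cons, not_or] at h
    simp [pvDprefs, ih h.2, Ne.symm h.1]

theorem pvFirstSome_cons_some (v : String) (r : List (Option String)) :
    pvFirstSome (some v :: r) = some v := rfl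

theorem pvFirstSome_cons_none (r : List (Option String)) :
    pvFirstSome (none :: r) = pvFirstSome r := rfl

theorem pvDprefs_append_singleton (ys : List Char) (c : Char) :
    pvDprefs (ys ++ [c]) = pvDprefs ys ++ (if c = '.' then [ys] else []) := by
  induction ys with
  | nil => by_cases hc : c = '.' <;> simp [pvDprefs, hc]
  | cons y ys ih =>
    simp only [List.cons_append, pvDprefs, ih, List.map_append]
    by_cases hc : c = '.' <;> by_cases hy : y = '.' <;> simp [hc, hy]

theorem pvDprefs_decomp (h t : List Char) (hnt : '.' ∉ t) :
    pvDprefs (h ++ '.' :: t) = pvDprefs h ++ [h] := by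
  induction h with
  | nil => simp [pvDprefs, pvDprefs_no_dot t hnt]
  | cons c h ih =>
    simp only [List.cons_append, pvDprefs, ih, List.map_append]
    by_cases hc : c = '.' <;> simp [hc]

theorem pvAloop_eq (idx : List (String × String)) (cs : List Char)
    (hne : cs ≠ []) (hhd : cs.head? ≠ some '.') :
    pvAloop idx cs = pvFirstSome (((pvDprefs cs ++ [cs]).reverse).map (pvLook idx)) := by
  by_cases hdot : '.' ∈ cs
  · obtain ⟨t, hcs, hnt⟩ := pvRsplitHead_decomp cs hdot
    have hh : pvRsplitHead cs ≠ [] := by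
      intro h0
      rw [h0] at hcs
      simp only [List.nil_append] at hcs
      rw [hcs] at hhd
      simp at hhd
    have hhdh : (pvRsplitHead cs).head? ≠ some '.' := by
      obtain ⟨a, h', ha⟩ := List.exists_cons_of_ne_nil hh
      rw [ha] at hcs ⊢
      rw [hcs] at hhd
      simpa using hhd
    have ih := pvAloop_eq idx (pvRsplitHead cs) hh hhdh
    have hdp : pvDprefs cs = pvDprefs (pvRsplitHead cs) ++ [pvRsplitHead cs] := by
      conv_lhs => rw [hcs]
      exact pvDprefs_decomp _ _ hnt
    rw [pvAloop, dif_neg hne, hdp]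
    have hrev : (pvDprefs (pvRsplitHead cs) ++ [pvRsplitHead cs] ++ [cs]).reverse
        = cs :: (pvDprefs (pvRsplitHead cs) ++ [pvRsplitHead cs]).reverse := by simp
    rw [hrev, List.map_cons]
    cases hl : pvLook idx cs with
    | some v => rw [pvFirstSome_cons_some]
    | none => rw [pvFirstSome_cons_none, dif_pos hdot, ih]
  · rw [pvAloop, dif_neg hne, pvDprefs_no_dot cs hdot]
    simp only [List.nil_append, List.reverse_cons, List.reverse_nil, List.map_cons,
      List.map_nil]
    cases hl : pvLook idx cs with
    | some v => rw [pvFirstSome_cons_some]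
    | none => rw [pvFirstSome_cons_none, dif_neg hdot]; rfl
termination_by cs.length
decreasing_by exact pvRsplitHead_len cs hdot

theorem pvBfold_eq (idx : List (String × String)) (cs : List Char) :
    cs.foldl
      (fun (st : List Char × Option String) ch =>
        (st.1 ++ [ch],
         if ch = '.' then
           match pvLook idx st.1 with
           | some v => some v
           | none => st.2
         else st.2))
      ([], none)
    = (cs, pvLastUpd idx none (pvDprefs cs)) := by
  induction cs using List.reverseRecOn with
  | nil => simp [pvLastUpd, pvDprefs]
  | append_singleton ys c ih =>
    rw [List.foldl_append, ih]
    simp only [List.foldl_cons, List.foldl_nil, pvDprefs_append_singleton]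
    split
    · simp [pvLastUpd, List.foldl_append]
    · simp [pvLastUpd]

theorem pvLastUpd_eq (idx : List (String × String)) (l : List (List Char)) :
    pvLastUpd idx none l = pvFirstSome ((l.reverse).map (pvLook idx)) := by
  induction l using List.reverseRecOn with
  | nil => rfl
  | append_singleton l p ih =>
    rw [List.reverse_append]
    simp only [pvLastUpd, List.foldl_append, List.foldl_cons, List.foldl_nil,
      List.reverse_cons, List.reverse_nil, List.nil_append, List.cons_append,
      List.map_cons]
    cases hl : pvLook idx p with
    | some v => rw [pvFirstSome_cons_some]
    | none =>
      rw [pvFirstSome_cons_none, ← ih]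
      rfl

-- a nonempty stripChars result over ['.'] does not start with '.'
theorem pvStrip_head (s : List Char) (hne : PySem.Chars.stripChars s ['.'] ≠ []) :
    (PySem.Chars.stripChars s ['.']).head? ≠ some '.' := by
  have hset : PySem.Chars.stripChars s ['.'] =
      (List.dropWhile (fun c => (['.'] : List Char).contains c)
        (List.dropWhile (fun c => (['.'] : List Char).contains c) s).reverse).reverse := rfl
  set p : Char → Bool := fun c => (['.'] : List Char).contains c with hp
  set u := List.dropWhile p s with hu
  set v := List.dropWhile p u.reverse with hv
  rw [hset] at hne ⊢
  have hvne : v ≠ [] := by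
    intro h0; apply hne; rw [h0]; rfl
  have hsuf : u.reverse = u.reverse.takeWhile p ++ v := by
    rw [hv]; exact (List.takeWhile_append_dropWhile).symm
  have hglast : v.getLast? = u.reverse.getLast? := by
    conv_rhs => rw [hsuf]
    rw [List.getLast?_append_of_ne_nil _ hvne]
  have hgu : u.reverse.getLast? = u.head? := List.getLast?_reverse
  intro hcontra
  have h1 : v.getLast? = some '.' := by
    rw [← List.head?_reverse]
    exact hcontra
  rw [hglast, hgu] at h1
  have h2 := List.head?_dropWhile_not p s
  rw [← hu, h1] at h2
  simp [hp] at h2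

-- ===== VERDICT (by name: the statement is the Claim_ definition above) =====
theorem resolve_local_import_py_spec : Claim_equal_resolve_local_import_py := by
  intro import_name idx _
  unfold Spec_resolve_local_import_py resolve_local_import_py resolve_local_import_py_alt
  set cleaned := PySem.Chars.stripChars import_name.toList ['.'] with hcl
  by_cases hne : cleaned = []
  · simp [hne]
  · simp only [if_neg hne]
    rw [pvAloop_eq idx cleaned hne (pvStrip_head _ hne), pvBfold_eq idx cleaned]
    simp only [List.reverse_append, List.reverse_cons, List.reverse_nil, List.nil_append,
      pvLastUpd_eq]
    cases hl : pvLook idx cleaned with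
    | some v => simp [pvFirstSome, hl]
    | none => simp [pvFirstSome, hl]
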